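-- pv_equiv track=rewrite | github.com/hemangsrr/linkedin_post_builder | agents/summary_agent.py | _parse_post_response
-- ===== SOURCE A (Python) =====
-- from typing import List, Optional
--
-- def _parse_post_response(response_text: str) -> List[str]:
--     """Helper to parse the LLM response into separate posts"""
--     posts = []
--     current_post = []
--
--     for line in response_text.split('\n'):
--         if line.startswith(('1.', '2.', '3.', '4.', '5.')) and current_post:
--             posts.append('\n'.join(current_post).strip())
--             current_post = []
--         current_post.append(line)
--
--     if current_post:
--         posts.append('\n'.join(current_post).strip())
--
--     return posts or [response_text.strip()]  # Fallback if parsing fails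
-- ===== SOURCE B (Python) =====
-- from typing import List
--
-- _PREFIXES = ('1.', '2.', '3.', '4.', '5.')
--
-- def _parse_post_response(response_text: str) -> List[str]:
--     """Two-pointer scan: jump from one numbered boundary line to the next and slice."""
--     lines = response_text.split('\n')
--     posts = []
--     i = 0
--     while i < len(lines):
--         j = i + 1
--         while j < len(lines) and not lines[j].startswith(_PREFIXES):
--             j += 1
--         posts.append('\n'.join(lines[i:j]).strip())
--         i = j
--     return posts
-- ===== Notes on version B (the rewrite author's own statement) =====
-- stated objective: alternative
-- what changed: Replaces A's single fold that carries a growing current-post accumulator (append line by line, flush on boundary, plus a final flush and an or-fallback) with a two-pointer index scan: find the next boundary line index, slice the line list between consecutive boundaries, and join each slice; no accumulator, no flush, no fallback (the line list is never empty so A's fallback is dead code).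
import Mathlib
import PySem

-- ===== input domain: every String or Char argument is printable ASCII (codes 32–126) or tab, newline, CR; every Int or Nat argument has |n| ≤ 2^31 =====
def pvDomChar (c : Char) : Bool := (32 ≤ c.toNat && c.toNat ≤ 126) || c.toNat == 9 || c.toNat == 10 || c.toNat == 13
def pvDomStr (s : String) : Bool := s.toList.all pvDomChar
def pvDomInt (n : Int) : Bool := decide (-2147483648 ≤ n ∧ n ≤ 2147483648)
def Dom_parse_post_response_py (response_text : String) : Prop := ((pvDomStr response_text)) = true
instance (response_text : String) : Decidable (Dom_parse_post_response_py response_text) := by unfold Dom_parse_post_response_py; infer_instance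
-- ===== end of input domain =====

-- B replaces A's fold-with-accumulator by a two-pointer boundary scan over the line list; objective: alternative decomposition (same O(n) cost).

-- ===== PORT A =====
-- line.startswith(('1.', '2.', '3.', '4.', '5.'))
def startsNumA (line : String) : Bool :=
  PySem.Str.startswith line "1." || PySem.Str.startswith line "2." ||
  PySem.Str.startswith line "3." || PySem.Str.startswith line "4." ||
  PySem.Str.startswith line "5."

def parse_post_response_py (response_text : String) : List String :=
  -- lines = response_text.split('\n'); sep ≠ "" so split? is some
  let lines := (PySem.Str.split? response_text "\n").getD []
  -- for line in lines: … carrying (posts, current_post)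
  let st := lines.foldl (fun (st : List String × List String) line =>
      if startsNumA line && !st.2.isEmpty then
        (st.1 ++ [PySem.Str.strip (PySem.Str.join "\n" st.2)], [line])
      else
        (st.1, st.2 ++ [line])) ([], [])
  -- if current_post: posts.append(…)
  let posts := if !st.2.isEmpty then st.1 ++ [PySem.Str.strip (PySem.Str.join "\n" st.2)] else st.1
  -- return posts or [response_text.strip()]
  if posts.isEmpty then [PySem.Str.strip response_text] else posts

-- ===== PORT B =====
-- line.startswith(_PREFIXES)
def startsNumB (line : String) : Bool :=
  PySem.Str.startswith line "1." || PySem.Str.startswith line "2." ||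
  PySem.Str.startswith line "3." || PySem.Str.startswith line "4." ||
  PySem.Str.startswith line "5."

-- inner while: j = i+1; while j < len(lines) and not lines[j].startswith(_PREFIXES): j += 1
def nextBoundary (lines : List String) (j : Nat) : Nat :=
  if h : j < lines.length then
    if !startsNumB (lines.getD j "") then nextBoundary lines (j + 1) else j
  else j
termination_by lines.length - j

theorem le_nextBoundary (lines : List String) (j : Nat) : j ≤ nextBoundary lines j := by
  fun_induction nextBoundary lines j with
  | case1 j h hb ih => omega
  | case2 j h hb => omega
  | case3 j h => omega

-- outer while: slice lines[i:j], join, strip, continue from j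
def buildPosts (lines : List String) (i : Nat) : List String :=
  if h : i < lines.length then
    -- j = the next boundary index after i (Python names it j; it is used twice)
    PySem.Str.strip (PySem.Str.join "\n"
        (PySem.List.slice lines (some (i : Int)) (some (nextBoundary lines (i + 1) : Int))))
      :: buildPosts lines (nextBoundary lines (i + 1))
  else []
termination_by lines.length - i
decreasing_by have := le_nextBoundary lines (i + 1); omega

def parse_post_response_py_alt (response_text : String) : List String :=
  buildPosts ((PySem.Str.split? response_text "\n").getD []) 0

-- ===== PRECONDITION & SPEC =====
def Spec_parse_post_response_py (response_text : String) (out : List String) : Prop := out = parse_post_response_py_alt response_text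
instance (response_text : String) (out : List String) : Decidable (Spec_parse_post_response_py response_text out) := by unfold Spec_parse_post_response_py; infer_instance

-- ===== CLAIM (what is proved, stated in full; the proofs are below) =====
def Claim_equal_parse_post_response_py : Prop := ∀ (response_text : String), Dom_parse_post_response_py response_text → Spec_parse_post_response_py response_text (parse_post_response_py response_text)

-- ===== LEMMAS AND PROOFS =====

-- '\n'.join(cur).strip()
def joinStrip (cur : List String) : String := PySem.Str.strip (PySem.Str.join "\n" cur)

-- common reference: split a line list into posts, one line at a time, current group `cur`
def groupRec : List String → List String → List String
  | cur, [] => [joinStrip cur]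
  | cur, l :: r => if startsNumA l then joinStrip cur :: groupRec [l] r else groupRec (cur ++ [l]) r

def tailGroups : List String → List String
  | [] => []
  | b :: r => groupRec [b] r

theorem groupRec_ne_nil (cur ls : List String) : groupRec cur ls ≠ [] := by
  cases ls with
  | nil => simp [groupRec]
  | cons l r =>
    induction r generalizing cur l with
    | nil => simp only [groupRec]; split <;> simp
    | cons b r ih =>
      simp only [groupRec]
      split
      · simp only [ne_eq, List.cons_ne_nil, not_false_eq_true]
      · exact ih _ _

-- A's loop, run from any state with a nonempty current post, then finalized
theorem foldA_eq_groupRec (ls : List String) : ∀ (posts cur : List String), cur ≠ [] →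
    (let st := ls.foldl (fun (st : List String × List String) line =>
        if startsNumA line && !st.2.isEmpty then
          (st.1 ++ [PySem.Str.strip (PySem.Str.join "\n" st.2)], [line])
        else
          (st.1, st.2 ++ [line])) (posts, cur)
     if !st.2.isEmpty then st.1 ++ [PySem.Str.strip (PySem.Str.join "\n" st.2)] else st.1)
      = posts ++ groupRec cur ls := by
  induction ls with
  | nil =>
    intro posts cur hcur
    simp [groupRec, joinStrip, hcur]
  | cons l r ih =>
    intro posts cur hcur
    have hc : cur.isEmpty = false := by simp [hcur]
    simp only [List.foldl_cons]
    by_cases hb : startsNumA l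
    · rw [if_pos (show (startsNumA l && !cur.isEmpty) = true by rw [hb, hc]; rfl)]
      rw [ih (posts ++ [PySem.Str.strip (PySem.Str.join "\n" cur)]) [l] (by simp)]
      simp [groupRec, hb, joinStrip]
    · rw [if_neg (show ¬ (startsNumA l && !cur.isEmpty) = true by simp [hb])]
      rw [ih posts (cur ++ [l]) (by simp), groupRec, if_neg (by simp [hb])]

theorem nextBoundary_eq (lines : List String) (j : Nat) (hj : j ≤ lines.length) :
    nextBoundary lines j = j + ((lines.drop j).takeWhile (fun l => !startsNumA l)).length := by
  fun_induction nextBoundary lines j with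
  | case1 j h hb ih =>
    rw [List.drop_eq_getElem_cons h]
    have hg : lines[j] = lines.getD j "" := by simp [List.getD, List.getElem?_eq_getElem h]
    rw [List.takeWhile_cons, hg, if_pos (show (!startsNumA (lines.getD j "")) = true from hb)]
    rw [ih (by omega)]
    simp; omega
  | case2 j h hb =>
    rw [List.drop_eq_getElem_cons h]
    have hg : lines[j] = lines.getD j "" := by simp [List.getD, List.getElem?_eq_getElem h]
    rw [List.takeWhile_cons, hg, if_neg (show ¬(!startsNumA (lines.getD j "")) = true from hb)]
    simp
  | case3 j h =>
    have : lines.length ≤ j := by omega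
    simp [List.drop_eq_nil_of_le this]

theorem groupRec_span (ls : List String) : ∀ (cur : List String),
    groupRec cur ls = joinStrip (cur ++ ls.takeWhile (fun l => !startsNumA l))
      :: tailGroups (ls.dropWhile (fun l => !startsNumA l)) := by
  induction ls with
  | nil => intro cur; simp [groupRec, tailGroups]
  | cons l r ih =>
    intro cur
    by_cases hb : startsNumA l
    · simp [groupRec, hb, tailGroups]
    · simp only [groupRec, hb, if_neg, Bool.false_eq_true, not_false_eq_true,
        List.takeWhile_cons, List.dropWhile_cons]
      rw [ih (cur ++ [l])]
      simp

theorem buildPosts_eq_groupRec (lines : List String) : ∀ (i : Nat), i < lines.length →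
    buildPosts lines i = groupRec [lines.getD i ""] (lines.drop (i + 1)) := by
  intro i
  induction hn : lines.length - i using Nat.strong_induction_on generalizing i with
  | _ n ih =>
  intro hi
  rw [buildPosts, dif_pos hi]
  have hj := nextBoundary_eq lines (i + 1) (by omega)
  have hij : i + 1 ≤ nextBoundary lines (i + 1) := le_nextBoundary lines (i + 1)
  set tw := (lines.drop (i + 1)).takeWhile (fun l => !startsNumA l) with htw
  generalize hjdef : nextBoundary lines (i + 1) = j
  rw [hjdef] at hj hij
  have hjlen : j ≤ lines.length := by
    have h1 : tw.length ≤ (lines.drop (i + 1)).length :=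
      (htw ▸ List.takeWhile_prefix _).length_le
    simp only [List.length_drop] at h1
    omega
  -- the slice is lines[i] :: tw
  have hdropi : lines.drop i = lines.getD i "" :: lines.drop (i + 1) := by
    rw [List.drop_eq_getElem_cons hi]
    simp [List.getD, List.getElem?_eq_getElem hi]
  have htake : (lines.drop (i + 1)).take tw.length = tw := by
    have := List.takeWhile_prefix (l := lines.drop (i + 1)) (p := fun l => !startsNumA l)
    exact ((List.prefix_iff_eq_take.mp this)).symm
  have hslice : PySem.List.slice lines (some (i : Int)) (some (j : Int))
      = lines.getD i "" :: tw := by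
    have : ((j : Int)) = ((i : Int)) + ((j - i : Nat) : Int) := by omega
    rw [this, PySem.List.slice_natCast_add, hdropi]
    have : j - i = tw.length + 1 := by omega
    rw [this, List.take_succ_cons, htake]
  -- the rest: drop j = dropWhile
  have hdropj : lines.drop j = (lines.drop (i + 1)).dropWhile (fun l => !startsNumA l) := by
    have hsplit := List.takeWhile_append_dropWhile (p := fun l => !startsNumA l)
      (l := lines.drop (i + 1))
    have : lines.drop j = (lines.drop (i + 1)).drop tw.length := by
      rw [List.drop_drop]; congr 1; try omega
    rw [this]
    conv_lhs => rw [← hsplit]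
    rw [List.drop_left' rfl]
  rw [hslice, groupRec_span, List.singleton_append]
  congr 1
  · rw [← hdropj]
    cases hdj : lines.drop j with
    | nil =>
      have : lines.length ≤ j := by
        by_contra hlt
        exact absurd hdj (by simp [List.drop_eq_nil_iff]; omega)
      simp [tailGroups, buildPosts, Nat.not_lt.mpr this]
    | cons b r =>
      have hjlt : j < lines.length := by
        by_contra hge
        rw [List.drop_eq_nil_of_le (by omega)] at hdj; exact absurd hdj (by simp)
      have hb : b = lines.getD j "" := by
        have := List.drop_eq_getElem_cons hjlt
        rw [hdj] at this
        simp [List.getD, List.getElem?_eq_getElem hjlt]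
        exact (List.cons.injEq .. ▸ this).1
      have hr : r = lines.drop (j + 1) := by
        have := List.drop_eq_getElem_cons hjlt
        rw [hdj] at this
        exact (List.cons.injEq .. ▸ this).2
      rw [tailGroups, hb, hr, ih (lines.length - j) (by omega) j rfl hjlt]

-- the line list of split('\n') is never empty
theorem splitOn_go_ne_nil (sep : List Char) (fuel : Nat) :
    ∀ (l cur : List Char) (acc : List (List Char)),
      PySem.Chars.splitOn.go sep fuel l cur acc ≠ [] := by
  induction fuel with
  | zero => intro l cur acc; rw [PySem.Chars.splitOn.go]; simp
  | succ fuel ih =>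
    intro l cur acc
    cases l with
    | nil => rw [PySem.Chars.splitOn.go]; simp; omega
    | cons c rest =>
      rw [PySem.Chars.splitOn.go]
      split
      · exact ih _ _ _
      · exact ih _ _ _

theorem lines_ne_nil (s : String) : (PySem.Str.split? s "\n").getD [] ≠ [] := by
  show (Option.map _ (PySem.Chars.split? s.toList "\n".toList)).getD [] ≠ []
  rw [PySem.Chars.split?]
  simp only [List.isEmpty_iff]
  rw [if_neg (by decide)]
  simp only [Option.map_some, Option.getD_some, ne_eq, List.map_eq_nil_iff]
  exact splitOn_go_ne_nil _ _ _ _ _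

-- ===== VERDICT (by name: the statement is the Claim_ definition above) =====
theorem parse_post_response_py_spec : Claim_equal_parse_post_response_py := by
  intro t _
  unfold Spec_parse_post_response_py parse_post_response_py parse_post_response_py_alt
  cases hl : (PySem.Str.split? t "\n").getD [] with
  | nil => exact absurd hl (lines_ne_nil t)
  | cons l0 rest =>
    simp only [List.foldl_cons]
    have hstep : (if startsNumA l0 && !(([] : List String).isEmpty) then
        (([] : List String) ++ [PySem.Str.strip (PySem.Str.join "\n" ([] : List String))], [l0])
      else (([] : List String), ([] : List String) ++ [l0])) = (([] : List String), [l0]) := by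
      simp
    rw [hstep]
    have hA := foldA_eq_groupRec rest [] [l0] (by simp)
    simp only [List.nil_append] at hA
    rw [hA]
    rw [if_neg (by simp [List.isEmpty_iff]; exact groupRec_ne_nil _ _)]
    have hB := buildPosts_eq_groupRec (l0 :: rest) 0 (by simp)
    rw [hB]
    simp [List.getD]
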